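-- pv_equiv track=rewrite | github.com/ghamarian/pythonck | tests/test_tensor_transform_examples.py | _extract_descriptors_from_multi_example
-- ===== SOURCE A (Python) =====
-- def _extract_descriptors_from_multi_example(example_text):
--     """Extract individual descriptors from multi-descriptor examples."""
--     lines = [line.strip() for line in example_text.strip().split('\n') if line.strip()]
--     descriptors = []
--     current_desc = []
--
--     for line in lines:
--         if line.startswith(('const auto', 'constexpr auto')):
--             if current_desc:
--                 # Process previous descriptor
--                 desc_text = ' '.join(current_desc)
--                 if '=' in desc_text:
--                     rhs = desc_text.split('=', 1)[1].strip()
--                     if rhs.endswith(';'):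
--                         rhs = rhs[:-1]
--                     descriptors.append(rhs)
--                 current_desc = []
--             current_desc.append(line)
--         else:
--             current_desc.append(line)
--
--     # Don't forget the last descriptor
--     if current_desc:
--         desc_text = ' '.join(current_desc)
--         if '=' in desc_text:
--             rhs = desc_text.split('=', 1)[1].strip()
--             if rhs.endswith(';'):
--                 rhs = rhs[:-1]
--             descriptors.append(rhs)
--
--     return descriptors
-- ===== SOURCE B (Python) =====
-- def _rhs(text):
--     if '=' not in text:
--         return None
--     rhs = text.split('=', 1)[1].strip()
--     if rhs.endswith(';'):
--         rhs = rhs[:-1]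
--     return rhs
--
--
-- def _extract_descriptors_from_multi_example(example_text):
--     """Single reverse scan: walk the lines bottom-up, emit a descriptor the moment
--     its opening 'const auto'/'constexpr auto' line is reached, build output back-to-front."""
--     lines = [s for s in (line.strip() for line in example_text.strip().split('\n')) if s]
--     out = []
--     tail = []  # lines below the current position, up to the next descriptor start (bottom-up order)
--     for line in reversed(lines):
--         if line.startswith(('const auto', 'constexpr auto')):
--             rhs = _rhs(' '.join([line] + tail[::-1]))
--             if rhs is not None:
--                 out.append(rhs)
--             tail = []
--         else:
--             tail.append(line)
--     if tail:
--         rhs = _rhs(' '.join(tail[::-1]))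
--         if rhs is not None:
--             out.append(rhs)
--     return out[::-1]
-- ===== Notes on version B (the rewrite author's own statement) =====
-- stated objective: alternative
-- what changed: Replaced A's forward accumulate-then-flush loop (flush code written twice) by a single reverse bottom-up scan that emits each descriptor the moment its opening 'const auto'/'constexpr auto' line is reached, building the output back-to-front and reversing once at the end.
import Mathlib
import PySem

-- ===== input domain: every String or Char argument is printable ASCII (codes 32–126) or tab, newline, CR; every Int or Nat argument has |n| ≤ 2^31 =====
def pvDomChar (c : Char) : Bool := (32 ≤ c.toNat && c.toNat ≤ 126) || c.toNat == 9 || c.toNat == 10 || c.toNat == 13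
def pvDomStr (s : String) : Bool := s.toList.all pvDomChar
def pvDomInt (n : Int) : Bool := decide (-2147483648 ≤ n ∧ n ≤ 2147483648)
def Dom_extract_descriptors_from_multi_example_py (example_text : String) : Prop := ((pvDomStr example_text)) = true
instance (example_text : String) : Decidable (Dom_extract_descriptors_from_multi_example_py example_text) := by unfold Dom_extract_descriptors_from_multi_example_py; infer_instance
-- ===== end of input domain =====

-- B replaces A's forward accumulate-and-flush loop by a single reverse (bottom-up) scan
-- that emits each descriptor when its opening 'const/constexpr auto' line is reached,
-- building the output back-to-front; same cost, objective: alternative.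

-- ===== PORT A =====
-- A's loop body: flush current_desc into descriptors on a 'const auto'/'constexpr auto' line, else accumulate
def pvStepA (st : List String × List String) (line : String) : List String × List String :=
  if PySem.Str.startswith line "const auto" || PySem.Str.startswith line "constexpr auto" then
    if st.2 ≠ [] then
      let desc_text := PySem.Str.join " " st.2
      let descriptors :=
        if PySem.Str.isIn "=" desc_text then
          let rhs := PySem.Str.strip (((PySem.Str.splitMax? desc_text "=" 1).getD []).getD 1 "")
          let rhs := if PySem.Str.endswith rhs ";" then PySem.Str.slice rhs none (some (-1)) else rhs
          st.1 ++ [rhs]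
        else st.1
      (descriptors, [] ++ [line])
    else (st.1, st.2 ++ [line])
  else (st.1, st.2 ++ [line])

def extract_descriptors_from_multi_example_py (example_text : String) : List String :=
  let lines := ((PySem.Str.split? (PySem.Str.strip example_text) "\n").getD []).filterMap
    (fun line => if PySem.Str.strip line ≠ "" then some (PySem.Str.strip line) else none)
  let st := lines.foldl pvStepA ([], [])
  -- "Don't forget the last descriptor" (A repeats the flush code here)
  if st.2 ≠ [] then
    let desc_text := PySem.Str.join " " st.2
    if PySem.Str.isIn "=" desc_text then
      let rhs := PySem.Str.strip (((PySem.Str.splitMax? desc_text "=" 1).getD []).getD 1 "")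
      let rhs := if PySem.Str.endswith rhs ";" then PySem.Str.slice rhs none (some (-1)) else rhs
      st.1 ++ [rhs]
    else st.1
  else st.1

-- ===== PORT B =====
-- _rhs: the RHS of a joined descriptor text, none if it has no '='
def pvRhs (text : String) : Option String :=
  if ¬ (PySem.Str.isIn "=" text) then none
  else
    let rhs := PySem.Str.strip (((PySem.Str.splitMax? text "=" 1).getD []).getD 1 "")
    some (if PySem.Str.endswith rhs ";" then PySem.Str.slice rhs none (some (-1)) else rhs)

-- B's reverse-scan loop body: state = (out, tail), tail in bottom-up order
def pvStepC (st : List String × List String) (line : String) : List String × List String :=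
  if PySem.Str.startswith line "const auto" || PySem.Str.startswith line "constexpr auto" then
    (match pvRhs (PySem.Str.join " " (line :: st.2.reverse)) with
     | some r => st.1 ++ [r]
     | none => st.1, [])
  else (st.1, st.2 ++ [line])

def extract_descriptors_from_multi_example_py_alt (example_text : String) : List String :=
  let lines := ((PySem.Str.split? (PySem.Str.strip example_text) "\n").getD []).filterMap
    (fun line => if PySem.Str.strip line ≠ "" then some (PySem.Str.strip line) else none)
  let st := lines.reverse.foldl pvStepC ([], [])
  let out :=
    if st.2 ≠ [] then
      match pvRhs (PySem.Str.join " " st.2.reverse) with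
      | some r => st.1 ++ [r]
      | none => st.1
    else st.1
  out.reverse

-- ===== PRECONDITION & SPEC =====
def Spec_extract_descriptors_from_multi_example_py (example_text : String) (out : List String) : Prop := out = extract_descriptors_from_multi_example_py_alt example_text
instance (example_text : String) (out : List String) : Decidable (Spec_extract_descriptors_from_multi_example_py example_text out) := by unfold Spec_extract_descriptors_from_multi_example_py; infer_instance

-- ===== CLAIM (what is proved, stated in full; the proofs are below) =====
def Claim_equal_extract_descriptors_from_multi_example_py : Prop := ∀ (example_text : String), Dom_extract_descriptors_from_multi_example_py example_text → Spec_extract_descriptors_from_multi_example_py example_text (extract_descriptors_from_multi_example_py example_text)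

-- ===== LEMMAS AND PROOFS =====
-- 'line continues the current descriptor' (not a starter line)
def pvCont (line : String) : Bool :=
  !(PySem.Str.startswith line "const auto" || PySem.Str.startswith line "constexpr auto")

-- A's final flush applied to a loop state
def pvFinishA (st : List String × List String) : List String :=
  if st.2 ≠ [] then
    let desc_text := PySem.Str.join " " st.2
    if PySem.Str.isIn "=" desc_text then
      let rhs := PySem.Str.strip (((PySem.Str.splitMax? desc_text "=" 1).getD []).getD 1 "")
      let rhs := if PySem.Str.endswith rhs ";" then PySem.Str.slice rhs none (some (-1)) else rhs
      st.1 ++ [rhs]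
    else st.1
  else st.1

-- the common specification: RHS list of the starter-headed groups (lines must start with a starter or be empty)
def pvTailGroups : List String → List String
  | [] => []
  | l :: ls =>
    (pvRhs (PySem.Str.join " " (l :: ls.takeWhile pvCont))).toList ++ pvTailGroups (ls.dropWhile pvCont)
termination_by xs => xs.length
decreasing_by
  exact Nat.lt_succ_of_le (List.length_dropWhile_le _ _)

lemma pvRhs_nil : pvRhs (PySem.Str.join " " ([] : List String)) = none := by decide

lemma pvMatch_toList (l : List String) (o : Option String) :
    (match o with | some r => l ++ [r] | none => l) = l ++ o.toList := by
  cases o <;> simp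

lemma pvFinishA_eq (st : List String × List String) :
    pvFinishA st = st.1 ++ (pvRhs (PySem.Str.join " " st.2)).toList := by
  unfold pvFinishA pvRhs
  by_cases h2 : st.2 ≠ []
  · simp only []; split_ifs <;> simp_all
  · simp only [ne_eq, not_not] at h2
    rw [h2]
    simpa using (by simpa [pvRhs] using pvRhs_nil)

lemma pvStepA_starter (d c : List String) (line : String)
    (h : (PySem.Str.startswith line "const auto" || PySem.Str.startswith line "constexpr auto") = true) :
    pvStepA (d, c) line = (d ++ (pvRhs (PySem.Str.join " " c)).toList, [line]) := by
  unfold pvStepA pvRhs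
  rw [if_pos h]
  by_cases hc : c ≠ []
  · simp only []; split_ifs <;> simp_all
  · simp only [ne_eq, not_not] at hc
    subst hc
    have := pvRhs_nil
    simp [pvRhs] at this
    simp [this]

-- A's loop: state (d, c) + remaining lines ⇒ final value in closed form
lemma pvA_char (lines : List String) :
    ∀ (d c : List String),
      pvFinishA (lines.foldl pvStepA (d, c)) =
        d ++ (pvRhs (PySem.Str.join " " (c ++ lines.takeWhile pvCont))).toList
          ++ pvTailGroups (lines.dropWhile pvCont) := by
  induction lines with
  | nil => intro d c; simp [pvFinishA_eq, pvTailGroups]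
  | cons line rest ih =>
    intro d c
    by_cases h : (PySem.Str.startswith line "const auto" || PySem.Str.startswith line "constexpr auto") = true
    · have hcont : pvCont line = false := by unfold pvCont; rw [h]; rfl
      rw [List.foldl_cons, pvStepA_starter d c line h, ih,
        List.takeWhile_cons_of_neg (by simp [hcont]), List.dropWhile_cons_of_neg (by simp [hcont])]
      rw [pvTailGroups]
      simp [List.append_assoc]
    · have hf : (PySem.Str.startswith line "const auto" || PySem.Str.startswith line "constexpr auto") = false := by
        simpa using h
      have hcont : pvCont line = true := by unfold pvCont; rw [hf]; rfl
      have hA : pvStepA (d, c) line = (d, c ++ [line]) := by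
        unfold pvStepA; rw [if_neg h]
      rw [List.foldl_cons, hA, ih,
        List.takeWhile_cons_of_pos hcont, List.dropWhile_cons_of_pos hcont]
      simp [List.append_assoc]

-- B's reverse loop in closed form
lemma pvB_char (lines : List String) :
    lines.reverse.foldl pvStepC ([], []) =
      ((pvTailGroups (lines.dropWhile pvCont)).reverse, (lines.takeWhile pvCont).reverse) := by
  induction lines with
  | nil => simp [pvTailGroups]
  | cons line rest ih =>
    have : (line :: rest).reverse.foldl pvStepC ([], [])
        = pvStepC (rest.reverse.foldl pvStepC ([], [])) line := by
      simp [List.reverse_cons, List.foldl_append]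
    rw [this, ih]
    by_cases h : (PySem.Str.startswith line "const auto" || PySem.Str.startswith line "constexpr auto") = true
    · have hcont : pvCont line = false := by unfold pvCont; rw [h]; rfl
      unfold pvStepC
      rw [if_pos h]
      rw [List.takeWhile_cons_of_neg (by simp [hcont]), List.dropWhile_cons_of_neg (by simp [hcont])]
      rw [pvTailGroups]
      rw [pvMatch_toList]
      simp only [List.reverse_reverse, List.reverse_append]
      cases pvRhs (PySem.Str.join " " (line :: rest.takeWhile pvCont)) <;> simp
    · have hf : (PySem.Str.startswith line "const auto" || PySem.Str.startswith line "constexpr auto") = false := by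
        simpa using h
      have hcont : pvCont line = true := by unfold pvCont; rw [hf]; rfl
      unfold pvStepC
      rw [if_neg h]
      rw [List.takeWhile_cons_of_pos hcont, List.dropWhile_cons_of_pos hcont]
      simp

-- A's value equals B's value, for the same line list
lemma pvAB (lines : List String) :
    pvFinishA (lines.foldl pvStepA ([], [])) =
      (let st := lines.reverse.foldl pvStepC ([], [])
       let out :=
         if st.2 ≠ [] then
           match pvRhs (PySem.Str.join " " st.2.reverse) with
           | some r => st.1 ++ [r]
           | none => st.1
         else st.1
       out.reverse) := by
  rw [pvA_char lines [] []]
  simp only [pvB_char]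
  by_cases htw : lines.takeWhile pvCont = []
  · simp [htw, pvRhs_nil]
  · have hne : (lines.takeWhile pvCont).reverse ≠ [] := by simpa using htw
    simp only [hne, ne_eq, not_false_iff, if_true, List.reverse_reverse, pvMatch_toList,
      List.reverse_append, List.nil_append]
    cases hval : pvRhs (PySem.Str.join " " (lines.takeWhile pvCont)) <;> simp

-- ===== VERDICT (by name: the statement is the Claim_ definition above) =====
theorem extract_descriptors_from_multi_example_py_spec : Claim_equal_extract_descriptors_from_multi_example_py := by
  intro example_text _
  unfold Spec_extract_descriptors_from_multi_example_py
  unfold extract_descriptors_from_multi_example_py extract_descriptors_from_multi_example_py_alt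
  exact pvAB _
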